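-- pv_equiv track=rewrite | github.com/t3chn/vibecode-ai-mentor | tests/test_runner.py | _extract_failures_from_output
-- ===== SOURCE A (Python) =====
-- from typing import Dict, List, Any, Optional
--
-- def _extract_failures_from_output(output: str) -> List[str]:
--     """Extract failure information from pytest output."""
--     failures = []
--     lines = output.split('\n')
--
--     in_failure = False
--     current_failure = []
--
--     for line in lines:
--         if line.startswith('FAILED '):
--             if current_failure and in_failure:
--                 failures.append('\n'.join(current_failure))
--             current_failure = [line]
--             in_failure = True
--         elif in_failure and (line.startswith('=') or line.startswith('_')):
--             if current_failure:
--                 failures.append('\n'.join(current_failure))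
--             current_failure = []
--             in_failure = False
--         elif in_failure:
--             current_failure.append(line)
--
--     if current_failure and in_failure:
--         failures.append('\n'.join(current_failure))
--
--     return failures
-- ===== SOURCE B (Python) =====
-- from typing import List
--
--
-- def _extract_failures_from_output(output: str) -> List[str]:
--     """Extract failure information from pytest output.
--
--     Block-scan decomposition: find each line starting with 'FAILED ', then
--     collect following lines until a terminator ('='/'_' prefix), another
--     'FAILED ' line, or end of input; join each block with newlines.
--     """
--     lines = output.split('\n')
--     n = len(lines)
--     failures = []
--     i = 0
--     while i < n:
--         if not lines[i].startswith('FAILED '):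
--             i += 1
--             continue
--         j = i + 1
--         while j < n and not (lines[j].startswith('FAILED ')
--                              or lines[j].startswith('=')
--                              or lines[j].startswith('_')):
--             j += 1
--         failures.append('\n'.join(lines[i:j]))
--         i = j
--         if i < n and not lines[i].startswith('FAILED '):
--             i += 1  # terminator line is consumed
--     return failures
-- ===== Notes on version B (the rewrite author's own statement) =====
-- stated objective: alternative
-- what changed: Replaced the in_failure/current_failure state machine with an outer scan for FAILED-prefixed block starts plus an inner scan collecting each block up to its terminator, joining each block as it is found.
import Mathlib
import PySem

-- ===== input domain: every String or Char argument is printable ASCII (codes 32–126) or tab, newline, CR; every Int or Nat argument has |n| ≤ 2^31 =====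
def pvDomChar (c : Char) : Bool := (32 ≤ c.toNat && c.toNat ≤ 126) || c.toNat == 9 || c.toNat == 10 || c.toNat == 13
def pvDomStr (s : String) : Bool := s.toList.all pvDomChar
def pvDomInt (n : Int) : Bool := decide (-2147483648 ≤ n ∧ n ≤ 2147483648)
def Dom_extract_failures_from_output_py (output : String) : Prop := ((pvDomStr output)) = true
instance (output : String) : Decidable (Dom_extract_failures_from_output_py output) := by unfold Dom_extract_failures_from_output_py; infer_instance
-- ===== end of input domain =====

-- B replaces A's in_failure/current_failure state machine by an outer scan for
-- 'FAILED ' block starts plus an inner scan collecting each block up to its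
-- terminator; same return value, same O(n) cost (objective: alternative).

-- ===== PORT A =====
-- one step of A's for-loop; state = (failures, in_failure, current_failure)
def aStep (st : List String × Bool × List String) (line : String) :
    List String × Bool × List String :=
  if PySem.Str.startswith line "FAILED " then
    ((if !st.2.2.isEmpty && st.2.1 then st.1 ++ [PySem.Str.join "\n" st.2.2] else st.1),
     true, [line])
  else if st.2.1 && (PySem.Str.startswith line "=" || PySem.Str.startswith line "_") then
    ((if !st.2.2.isEmpty then st.1 ++ [PySem.Str.join "\n" st.2.2] else st.1), false, [])
  else if st.2.1 then (st.1, st.2.1, st.2.2 ++ [line])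
  else st

-- A's trailing 'if current_failure and in_failure: failures.append(...)'
def aFlush (st : List String × Bool × List String) : List String :=
  if !st.2.2.isEmpty && st.2.1 then st.1 ++ [PySem.Str.join "\n" st.2.2] else st.1

def extract_failures_from_output_py (output : String) : List String :=
  aFlush (((PySem.Str.split? output "\n").getD []).foldl aStep ([], false, []))

-- ===== PORT B =====
-- B's inner while-loop: split off the lines of the current block (first
-- component) from the rest starting at the stop line, if any (second component)
def collectB : List String → List String × List String
  | [] => ([], [])
  | l :: rest =>
    if PySem.Str.startswith l "FAILED " || PySem.Str.startswith l "="
        || PySem.Str.startswith l "_" then ([], l :: rest)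
    else
      let p := collectB rest
      (l :: p.1, p.2)

theorem collectB_snd_length_le (ls : List String) : (collectB ls).2.length ≤ ls.length := by
  induction ls with
  | nil => simp [collectB]
  | cons l rest ih =>
    simp only [collectB]
    split
    · simp
    · simpa using Nat.le_succ_of_le ih

-- B's outer while-loop as recursion on the suffix of lines still to scan
def altGo : List String → List String
  | [] => []
  | l :: rest =>
    if PySem.Str.startswith l "FAILED " then
      PySem.Str.join "\n" (l :: (collectB rest).1) :: altGo (collectB rest).2
    else altGo rest
termination_by ls => ls.length
decreasing_by
  · exact Nat.lt_succ_of_le (collectB_snd_length_le rest)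
  · exact Nat.lt_succ_self _

def extract_failures_from_output_py_alt (output : String) : List String :=
  altGo ((PySem.Str.split? output "\n").getD [])

-- ===== PRECONDITION & SPEC =====
def Spec_extract_failures_from_output_py (output : String) (out : List String) : Prop := out = extract_failures_from_output_py_alt output
instance (output : String) (out : List String) : Decidable (Spec_extract_failures_from_output_py output out) := by unfold Spec_extract_failures_from_output_py; infer_instance

-- ===== CLAIM (what is proved, stated in full; the proofs are below) =====
def Claim_equal_extract_failures_from_output_py : Prop := ∀ (output : String), Dom_extract_failures_from_output_py output → Spec_extract_failures_from_output_py output (extract_failures_from_output_py output)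

-- ===== LEMMAS AND PROOFS =====

-- Joint loop invariant: running A's loop from the idle state produces altGo of
-- the remaining lines; from an in-failure state with nonempty current block it
-- produces that block extended by collectB's collection, then altGo of the rest.
theorem main_invariant (ls : List String) :
    (∀ fs, aFlush (ls.foldl aStep (fs, false, [])) = fs ++ altGo ls) ∧
    (∀ fs cur, cur ≠ [] →
      aFlush (ls.foldl aStep (fs, true, cur)) =
        fs ++ (PySem.Str.join "\n" (cur ++ (collectB ls).1) :: altGo (collectB ls).2)) := by
  induction ls with
  | nil =>
    refine ⟨fun fs => by simp [aFlush, altGo], fun fs cur hcur => ?_⟩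
    simp [aFlush, altGo, collectB, List.isEmpty_eq_false_iff.mpr hcur]
  | cons l rest ih =>
    obtain ⟨ih1, ih2⟩ := ih
    by_cases hF : PySem.Str.startswith l "FAILED " = true
    · refine ⟨fun fs => ?_, fun fs cur hcur => ?_⟩
      · simp only [List.foldl_cons, aStep, hF, if_true, List.isEmpty_nil, Bool.not_true,
          Bool.false_and, Bool.false_eq_true, if_false]
        rw [ih2 fs [l] (by simp)]
        simp only [altGo, hF, if_true, List.singleton_append]
      · have hcur' : cur.isEmpty = false := List.isEmpty_eq_false_iff.mpr hcur
        simp only [List.foldl_cons, aStep, hF, if_true, hcur', Bool.not_false, Bool.true_and]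
        rw [ih2 (fs ++ [PySem.Str.join "\n" cur]) [l] (by simp)]
        simp only [collectB, hF, Bool.true_or, if_true, altGo, List.append_nil,
          List.append_assoc, List.cons_append, List.nil_append]
    · by_cases hT : (PySem.Str.startswith l "=" || PySem.Str.startswith l "_") = true
      · have hF' : PySem.Str.startswith l "FAILED " = false := by
          simpa using hF
        refine ⟨fun fs => ?_, fun fs cur hcur => ?_⟩
        · simp only [List.foldl_cons, aStep, hF', Bool.false_eq_true, if_false, hT,
            Bool.false_and, List.isEmpty_nil, Bool.not_true, List.nil_append]
          rw [ih1 fs]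
          simp only [altGo, hF', Bool.false_eq_true, if_false]
        · have hcur' : cur.isEmpty = false := List.isEmpty_eq_false_iff.mpr hcur
          simp only [List.foldl_cons, aStep, hF', Bool.false_eq_true, if_false, hT,
            Bool.true_and, if_true, hcur', Bool.not_false]
          rw [ih1 (fs ++ [PySem.Str.join "\n" cur])]
          simp only [collectB, hF', Bool.false_or, hT, if_true, altGo, Bool.false_eq_true,
            if_false, List.append_nil, List.append_assoc, List.singleton_append]
      · have hF' : PySem.Str.startswith l "FAILED " = false := by simpa using hF
        have hT' : (PySem.Str.startswith l "=" || PySem.Str.startswith l "_") = false := by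
          simpa using hT
        refine ⟨fun fs => ?_, fun fs cur hcur => ?_⟩
        · simp only [List.foldl_cons, aStep, hF', Bool.false_eq_true, if_false, hT',
            Bool.and_false]
          rw [ih1 fs]
          simp only [altGo, hF', Bool.false_eq_true, if_false]
        · simp only [List.foldl_cons, aStep, hF', Bool.false_eq_true, if_false, hT',
            Bool.true_and, if_true]
          rw [ih2 fs (cur ++ [l]) (by simp)]
          simp only [collectB, hF', Bool.false_or, hT', Bool.false_eq_true, if_false,
            List.append_assoc, List.cons_append, List.nil_append]

-- ===== VERDICT (by name: the statement is the Claim_ definition above) =====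
theorem extract_failures_from_output_py_spec : Claim_equal_extract_failures_from_output_py := by
  intro output _
  unfold Spec_extract_failures_from_output_py extract_failures_from_output_py
    extract_failures_from_output_py_alt
  rw [(main_invariant _).1 []]
  simp
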